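-- pv_equiv track=rewrite | github.com/ournexus/wenexus | backend/python/src/wenexus/service/langgraph_api/run_service.py | _select_primary_agent_mode
-- ===== SOURCE A (Python) =====
-- def _select_primary_agent_mode(requested_modes: list[str]) -> str:
--     """
--     Select the primary LangGraph agent stream mode based on requested SDK modes.
--
--     Priority order (most detailed first):
--     1. messages - for token-level streaming
--     2. values - for full state snapshots
--     3. updates - for incremental updates (default)
--
--     This ensures we get the most detailed data from the agent,
--     which can then be transformed into any requested SDK format.
--     """
--     for mode in requested_modes:
--         if mode in ("messages", "messages-tuple"):
--             return "messages"
--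
--     for mode in requested_modes:
--         if mode == "values":
--             return "values"
--
--     for mode in requested_modes:
--         if mode == "debug":
--             return "debug"
--
--     return "updates"
-- ===== SOURCE B (Python) =====
-- _RANK = {"messages": 3, "messages-tuple": 3, "values": 2, "debug": 1}
-- _BY_RANK = ("updates", "debug", "values", "messages")
--
--
-- def _select_primary_agent_mode(requested_modes: list[str]) -> str:
--     best = 0
--     for mode in requested_modes:
--         best = max(best, _RANK.get(mode, 0))
--     return _BY_RANK[best]
-- ===== Notes on version B (the rewrite author's own statement) =====
-- stated objective: alternative
-- what changed: Replaces A's three sequential early-return scans by a single pass that folds each mode into a numeric priority rank (max accumulator) and maps the best rank back to a mode name.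
import Mathlib
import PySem

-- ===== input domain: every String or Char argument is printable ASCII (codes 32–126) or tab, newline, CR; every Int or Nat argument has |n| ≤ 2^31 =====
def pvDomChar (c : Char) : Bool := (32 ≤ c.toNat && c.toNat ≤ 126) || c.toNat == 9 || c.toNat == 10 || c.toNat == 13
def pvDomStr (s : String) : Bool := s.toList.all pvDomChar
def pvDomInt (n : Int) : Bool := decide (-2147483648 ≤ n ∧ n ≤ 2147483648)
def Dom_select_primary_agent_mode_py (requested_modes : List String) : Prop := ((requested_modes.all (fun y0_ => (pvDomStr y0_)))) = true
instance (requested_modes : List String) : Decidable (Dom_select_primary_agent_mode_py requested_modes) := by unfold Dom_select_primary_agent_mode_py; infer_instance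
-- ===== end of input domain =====

-- B replaces A's three staged early-return scans by a single pass folding each mode into a
-- numeric priority rank (max accumulator), mapped back to a mode name (objective: alternative).

-- ===== PORT A =====
-- first loop: return "messages" on the first element in ("messages", "messages-tuple")
def pvScanMessages (l : List String) : Option String :=
  match l with
  | [] => none
  | m :: t => if m = "messages" ∨ m = "messages-tuple" then some "messages" else pvScanMessages t

-- second loop: return "values" on the first element equal to "values"
def pvScanValues (l : List String) : Option String :=
  match l with
  | [] => none
  | m :: t => if m = "values" then some "values" else pvScanValues t

-- third loop: return "debug" on the first element equal to "debug"
def pvScanDebug (l : List String) : Option String :=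
  match l with
  | [] => none
  | m :: t => if m = "debug" then some "debug" else pvScanDebug t

def select_primary_agent_mode_py (requested_modes : List String) : String :=
  match pvScanMessages requested_modes with
  | some r => r
  | none =>
    match pvScanValues requested_modes with
    | some r => r
    | none =>
      match pvScanDebug requested_modes with
      | some r => r
      | none => "updates"

-- ===== PORT B =====
-- the module-level constants _RANK and _BY_RANK of Source B
def pvRankDict : PySem.Dict String Int :=
  PySem.Dict.ofList [("messages", 3), ("messages-tuple", 3), ("values", 2), ("debug", 1)]

def pvByRank : List String := ["updates", "debug", "values", "messages"]

def select_primary_agent_mode_py_alt (requested_modes : List String) : String :=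
  let best := requested_modes.foldl (fun best mode => max best (pvRankDict.getD mode 0)) 0
  (PySem.List.pyGet? pvByRank best).getD ""   -- _BY_RANK[best]; best is always in 0..3 so the index is in range

-- ===== PRECONDITION & SPEC =====
def Spec_select_primary_agent_mode_py (requested_modes : List String) (out : String) : Prop := out = select_primary_agent_mode_py_alt requested_modes
instance (requested_modes : List String) (out : String) : Decidable (Spec_select_primary_agent_mode_py requested_modes out) := by unfold Spec_select_primary_agent_mode_py; infer_instance

-- ===== CLAIM (what is proved, stated in full; the proofs are below) =====
def Claim_equal_select_primary_agent_mode_py : Prop := ∀ (requested_modes : List String), Dom_select_primary_agent_mode_py requested_modes → Spec_select_primary_agent_mode_py requested_modes (select_primary_agent_mode_py requested_modes)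

-- ===== LEMMAS AND PROOFS =====
-- the rank of a single mode, as Source B's dict lookup computes it
theorem pvRank_getD (m : String) :
    pvRankDict.getD m 0 =
      if m = "messages" ∨ m = "messages-tuple" then 3
      else if m = "values" then 2 else if m = "debug" then 1 else 0 := by
  rcases eq_or_ne m "messages" with h1 | h1
  · subst h1; decide
  rcases eq_or_ne m "messages-tuple" with h2 | h2
  · subst h2; decide
  rcases eq_or_ne m "values" with h3 | h3
  · subst h3; decide
  rcases eq_or_ne m "debug" with h4 | h4
  · subst h4; decide
  have hd : pvRankDict = PySem.Dict.mk [("messages", 3), ("messages-tuple", 3), ("values", 2), ("debug", 1)] := by decide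
  simp [hd, PySem.Dict.getD, beq_iff_eq, Ne.symm h1, Ne.symm h2, Ne.symm h3, Ne.symm h4,
    h1, h2, h3, h4, PySem.Dict.get?]

-- the highest requested rank, characterised by membership
def pvT (l : List String) : Int :=
  if "messages" ∈ l ∨ "messages-tuple" ∈ l then 3
  else if "values" ∈ l then 2 else if "debug" ∈ l then 1 else 0

-- B's max-rank fold computes pvT
theorem pvBest_eq (l : List String) (b : Int) (hb : 0 ≤ b) :
    l.foldl (fun best mode => max best (pvRankDict.getD mode 0)) b = max b (pvT l) := by
  induction l generalizing b with
  | nil => simp [pvT]; omega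
  | cons m t ih =>
    rw [List.foldl_cons, ih _ (le_trans hb (le_max_left _ _)), max_assoc]
    congr 1
    rw [pvRank_getD]
    rcases eq_or_ne m "messages" with h1 | h1
    · subst h1; simp [pvT, List.mem_cons]; split_ifs <;> omega
    rcases eq_or_ne m "messages-tuple" with h2 | h2
    · subst h2; simp [pvT, List.mem_cons]; split_ifs <;> omega
    rcases eq_or_ne m "values" with h3 | h3
    · subst h3; simp [pvT, List.mem_cons, Ne.symm h1, Ne.symm h2]; split_ifs <;> omega
    rcases eq_or_ne m "debug" with h4 | h4
    · subst h4; simp [pvT, List.mem_cons, Ne.symm h1, Ne.symm h2, Ne.symm h3]; split_ifs <;> omega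
    simp [pvT, List.mem_cons, Ne.symm h1, Ne.symm h2, Ne.symm h3, Ne.symm h4, h1, h2, h3, h4]
    split_ifs <;> omega

-- the staged scans of A, characterised by membership
theorem pvScanMessages_eq (l : List String) :
    pvScanMessages l = if "messages" ∈ l ∨ "messages-tuple" ∈ l then some "messages" else none := by
  induction l with
  | nil => simp [pvScanMessages]
  | cons m t ih =>
    simp only [pvScanMessages, ih, List.mem_cons]
    by_cases h : m = "messages" ∨ m = "messages-tuple" <;> by_cases h2 : "messages" ∈ t ∨ "messages-tuple" ∈ t <;>
      simp [h, h2] <;> tauto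

theorem pvScanValues_eq (l : List String) :
    pvScanValues l = if "values" ∈ l then some "values" else none := by
  induction l with
  | nil => simp [pvScanValues]
  | cons m t ih =>
    simp only [pvScanValues, ih, List.mem_cons]
    by_cases h : m = "values" <;> by_cases h2 : "values" ∈ t <;> simp [h, h2, eq_comm]

theorem pvScanDebug_eq (l : List String) :
    pvScanDebug l = if "debug" ∈ l then some "debug" else none := by
  induction l with
  | nil => simp [pvScanDebug]
  | cons m t ih =>
    simp only [pvScanDebug, ih, List.mem_cons]
    by_cases h : m = "debug" <;> by_cases h2 : "debug" ∈ t <;> simp [h, h2, eq_comm]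

-- ===== VERDICT (by name: the statement is the Claim_ definition above) =====
theorem select_primary_agent_mode_py_spec : Claim_equal_select_primary_agent_mode_py := by
  intro l _
  unfold Spec_select_primary_agent_mode_py select_primary_agent_mode_py select_primary_agent_mode_py_alt
  simp only [pvScanMessages_eq, pvScanValues_eq, pvScanDebug_eq, pvBest_eq l 0 le_rfl]
  by_cases h1 : "messages" ∈ l ∨ "messages-tuple" ∈ l <;>
  by_cases h2 : "values" ∈ l <;>
  by_cases h3 : "debug" ∈ l <;>
    simp [pvT, pvByRank, h1, h2, h3, PySem.List.pyGet?, PySem.List.pyIdx?]
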